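-- pv_equiv track=rewrite | github.com/AIDEmeProject/AIDEme | api/src/routes/create_manager.py | compute_indexes_mapping
-- ===== SOURCE A (Python) =====
-- def compute_indexes_mapping(column_ids, new_column_names):
--     indexes_mapping = {}
--     for idx in column_ids:
--         indexes_mapping[idx] = [
--             new_idx
--             for new_idx, name in enumerate(new_column_names)
--             if name.startswith(str(idx))
--         ]
--     return indexes_mapping
-- ===== SOURCE B (Python) =====
-- def compute_indexes_mapping(column_ids, new_column_names):
--     id_strs = {str(idx) for idx in column_ids}
--     buckets = {}
--     for new_idx, name in enumerate(new_column_names):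
--         for L in range(len(name) + 1):
--             p = name[:L]
--             if p in id_strs:
--                 buckets.setdefault(p, []).append(new_idx)
--     return {idx: buckets.get(str(idx), []) for idx in column_ids}
-- ===== Notes on version B (the rewrite author's own statement) =====
-- stated objective: faster
-- what changed: Instead of scanning every name once per column id (startswith test per pair), B builds the set of id strings once, makes a single pass over the names enumerating each name's prefixes and bucketing its index under matching id strings, then reads each id's bucket.
import Mathlib
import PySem

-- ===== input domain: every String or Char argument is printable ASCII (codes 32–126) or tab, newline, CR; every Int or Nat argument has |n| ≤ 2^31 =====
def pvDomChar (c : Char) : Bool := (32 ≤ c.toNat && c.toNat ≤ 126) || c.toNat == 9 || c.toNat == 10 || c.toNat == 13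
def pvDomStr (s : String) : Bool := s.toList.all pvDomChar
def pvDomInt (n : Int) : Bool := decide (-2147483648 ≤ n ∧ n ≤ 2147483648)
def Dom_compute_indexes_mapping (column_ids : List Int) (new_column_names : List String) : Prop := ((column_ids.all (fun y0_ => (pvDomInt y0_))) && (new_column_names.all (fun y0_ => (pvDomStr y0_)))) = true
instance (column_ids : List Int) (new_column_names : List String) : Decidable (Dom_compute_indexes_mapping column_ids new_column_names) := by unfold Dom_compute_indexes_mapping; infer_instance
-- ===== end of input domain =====

-- B replaces A's per-id scan of all names by one pass over the names that buckets each
-- index under its prefixes that are id strings (objective: faster, asymptotic).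

-- ===== PORT A =====
def compute_indexes_mapping (column_ids : List Int) (new_column_names : List String) : List (Int × List Int) :=
  (column_ids.foldl (fun m idx =>
      m.insert idx
        (((PySem.List.enumerate new_column_names).filter
            (fun q => PySem.Str.startswith q.2 (PySem.Int.toStr idx))).map (·.1)))
    PySem.Dict.empty).items

-- ===== PORT B =====
def compute_indexes_mapping_alt (column_ids : List Int) (new_column_names : List String) : List (Int × List Int) :=
  let id_strs : PySem.Set String := PySem.Set.ofList (column_ids.map PySem.Int.toStr)
  let buckets : PySem.Dict String (List Int) :=
    (PySem.List.enumerate new_column_names).foldl (fun d q =>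
      (PySem.List.pyRange 0 (PySem.Str.len q.2 + 1) 1).foldl (fun d L =>
        let p := PySem.Str.slice q.2 none (some L)
        if PySem.Set.contains id_strs p then d.modify p [] (· ++ [q.1]) else d) d)
      PySem.Dict.empty
  (column_ids.foldl (fun m idx =>
      m.insert idx (buckets.getD (PySem.Int.toStr idx) [])) PySem.Dict.empty).items

-- ===== PRECONDITION & SPEC =====
def Spec_compute_indexes_mapping (column_ids : List Int) (new_column_names : List String) (out : List (Int × List Int)) : Prop := out = compute_indexes_mapping_alt column_ids new_column_names
instance (column_ids : List Int) (new_column_names : List String) (out : List (Int × List Int)) : Decidable (Spec_compute_indexes_mapping column_ids new_column_names out) := by unfold Spec_compute_indexes_mapping; infer_instance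

-- ===== CLAIM (what is proved, stated in full; the proofs are below) =====
def Claim_equal_compute_indexes_mapping : Prop := ∀ (column_ids : List Int) (new_column_names : List String), Dom_compute_indexes_mapping column_ids new_column_names → Spec_compute_indexes_mapping column_ids new_column_names (compute_indexes_mapping column_ids new_column_names)

-- ===== LEMMAS AND PROOFS =====

-- prefix list of a name, as produced by B's inner loop
def pvPrefs (s : String) : List String :=
  (PySem.List.pyRange 0 (PySem.Str.len s + 1) 1).map (fun L => PySem.Str.slice s none (some L))

theorem pvPrefs_eq (s : String) :
    pvPrefs s = (List.range (s.toList.length + 1)).map (fun (k : Nat) => PySem.Str.slice s none (some (k : Int))) := by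
  unfold pvPrefs
  rw [PySem.List.pyRange_one]
  have h1 : (PySem.Str.len s + 1 - 0).toNat = s.toList.length + 1 := by
    simp [PySem.Str.len_eq]
  rw [h1, List.map_map]
  apply List.map_congr_left
  intro k _
  simp

theorem toList_pref (s : String) (k : Nat) :
    (PySem.Str.slice s none (some (k : Int))).toList = s.toList.take k := by
  simp [PySem.Str.toList_slice, PySem.List.slice_to_natCast]

theorem mem_pvPrefs (s p : String) : p ∈ pvPrefs s ↔ PySem.Str.startswith s p = true := by
  rw [pvPrefs_eq, PySem.Str.startswith_eq, PySem.Chars.startswith_iff]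
  constructor
  · intro h
    rcases List.mem_map.mp h with ⟨k, _, rfl⟩
    rw [toList_pref]
    exact List.take_prefix k s.toList
  · intro h
    have hl : p.toList.length ≤ s.toList.length := h.length_le
    refine List.mem_map.mpr ⟨p.toList.length, ?_, ?_⟩
    · exact List.mem_range.mpr (by omega)
    · apply String.toList_inj.mp
      rw [toList_pref]
      exact (List.prefix_iff_eq_take.mp h).symm
  
theorem nodup_pvPrefs (s : String) : (pvPrefs s).Nodup := by
  rw [pvPrefs_eq]
  refine List.Nodup.map_on ?_ (List.nodup_range)
  intro k hk k' hk' he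
  have := congrArg (fun t => t.toList.length) he
  simp only [toList_pref, List.length_take] at this
  have hk := List.mem_range.mp hk
  have hk' := List.mem_range.mp hk'
  omega

theorem count_pvPrefs (s p : String) :
    (pvPrefs s).count p = if PySem.Str.startswith s p then 1 else 0 := by
  split
  · exact List.count_eq_one_of_mem (nodup_pvPrefs s) ((mem_pvPrefs s p).mpr (by assumption))
  · exact List.count_eq_zero_of_not_mem (fun hm => by
      have := (mem_pvPrefs s p).mp hm; simp_all)

theorem inner_getD (xs : List String) (g : String → Bool) (i : Int) :
    ∀ (d : PySem.Dict String (List Int)) (s : String),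
      (xs.foldl (fun d p => if g p then d.modify p [] (· ++ [i]) else d) d).getD s []
        = d.getD s [] ++ (if g s then List.replicate (xs.count s) i else []) := by
  induction xs with
  | nil => intro d s; simp
  | cons p xs ih =>
    intro d s
    rw [List.foldl_cons, ih]
    by_cases hps : s = p
    · subst hps
      by_cases hg : g s
      · rw [if_pos hg, if_pos hg, if_pos hg, PySem.Dict.getD_modify, if_pos rfl,
            List.count_cons_self, List.append_assoc, List.replicate_succ,
            List.singleton_append]
      · rw [if_neg hg, if_neg hg, if_neg hg]
    · have hcount : List.count s (p :: xs) = List.count s xs := by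
        simp [Ne.symm hps]
      rw [hcount]
      by_cases hg : g p
      · rw [if_pos hg, PySem.Dict.getD_modify, if_neg hps]
      · rw [if_neg hg]

theorem outer_getD (pairs : List (Int × String)) (g : String → Bool) :
    ∀ (d : PySem.Dict String (List Int)) (s : String),
      (pairs.foldl (fun d q =>
          (pvPrefs q.2).foldl (fun d p => if g p then d.modify p [] (· ++ [q.1]) else d) d) d).getD s []
        = d.getD s [] ++ (if g s then
            ((pairs.filter (fun q => PySem.Str.startswith q.2 s)).map (·.1)) else []) := by
  induction pairs with
  | nil => intro d s; simp
  | cons q pairs ih =>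
    intro d s
    rw [List.foldl_cons, ih, inner_getD, count_pvPrefs]
    by_cases hg : g s
    · rw [if_pos hg, if_pos hg, if_pos hg, List.append_assoc]
      congr 1
      by_cases hs : PySem.Str.startswith q.2 s
      · rw [if_pos hs, List.filter_cons_of_pos (by simpa using hs)]
        simp
      · rw [if_neg hs, List.filter_cons_of_neg (by simpa using hs)]
        simp
    · rw [if_neg hg, if_neg hg, if_neg hg]
      simp

theorem buckets_value (column_ids : List Int) (new_column_names : List String) (idx : Int)
    (hidx : idx ∈ column_ids) :
    (((PySem.List.enumerate new_column_names).foldl (fun d q =>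
        (PySem.List.pyRange 0 (PySem.Str.len q.2 + 1) 1).foldl (fun d L =>
          let p := PySem.Str.slice q.2 none (some L)
          if PySem.Set.contains (PySem.Set.ofList (column_ids.map PySem.Int.toStr)) p then
            d.modify p [] (· ++ [q.1]) else d) d)
      PySem.Dict.empty).getD (PySem.Int.toStr idx) [])
    = (((PySem.List.enumerate new_column_names).filter
          (fun q => PySem.Str.startswith q.2 (PySem.Int.toStr idx))).map (·.1)) := by
  set g : String → Bool :=
    fun p => PySem.Set.contains (PySem.Set.ofList (column_ids.map PySem.Int.toStr)) p with hgdef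
  have hfold : ∀ (d : PySem.Dict String (List Int)) (q : Int × String),
      (PySem.List.pyRange 0 (PySem.Str.len q.2 + 1) 1).foldl (fun d L =>
          let p := PySem.Str.slice q.2 none (some L)
          if g p then d.modify p [] (· ++ [q.1]) else d) d
        = (pvPrefs q.2).foldl (fun d p => if g p then d.modify p [] (· ++ [q.1]) else d) d := by
    intro d q
    rw [pvPrefs, List.foldl_map]
  rw [PySem.List.foldl_congr_mem _ _ _ _ (fun d q _ => hfold d q)]
  rw [outer_getD]
  have hgtrue : g (PySem.Int.toStr idx) = true := by
    rw [hgdef]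
    simp only [PySem.Set.contains]
    simp only [List.contains_eq_mem, decide_eq_true_eq]
    exact (PySem.Set.mem_ofList _ _).mpr (List.mem_map_of_mem hidx)
  rw [hgtrue]
  simp

theorem ports_agree (column_ids : List Int) (new_column_names : List String) :
    compute_indexes_mapping column_ids new_column_names
      = compute_indexes_mapping_alt column_ids new_column_names := by
  unfold compute_indexes_mapping compute_indexes_mapping_alt
  congr 1
  apply PySem.List.foldl_congr_mem
  intro acc idx hidx
  rw [buckets_value column_ids new_column_names idx hidx]

-- ===== VERDICT (by name: the statement is the Claim_ definition above) =====
theorem compute_indexes_mapping_spec : Claim_equal_compute_indexes_mapping := by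
  intro column_ids new_column_names _
  exact ports_agree column_ids new_column_names
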